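-- pv_equiv track=rewrite | github.com/dylancluyse/Algo20212022 | Oefeningen/Hoofdstuk 6/akkoorden.py | ontleding
-- ===== SOURCE A (Python) =====
-- def ontleding(akkoord):
--
--     listTxt = list(str(akkoord))
--
--     grondnoot = ''
--     type = ''
--
--     for i in range (len(listTxt)):
--         if i == 0:
--             grondnoot = listTxt[i]
--
--         if i == 1 and listTxt[i] == '#':
--             grondnoot +=  listTxt[i]
--
--         if i != 0 and listTxt[i] != '#':
--             type += listTxt[i]
--
--
--     return(grondnoot, type)
-- ===== SOURCE B (Python) =====
-- def ontleding(akkoord):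
--     s = str(akkoord)
--     if not s:
--         return ('', '')
--     grondnoot = s[0]
--     if len(s) > 1 and s[1] == '#':
--         grondnoot += '#'
--     return (grondnoot, s[1:].replace('#', ''))
-- ===== Notes on version B (the rewrite author's own statement) =====
-- stated objective: simpler
-- what changed: Replaces the index-scanning loop with three per-index conditionals by direct access: the root note is the first character plus an optional sharp from the second position, and the chord type is the tail slice with every sharp removed via str.replace.
import Mathlib
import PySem

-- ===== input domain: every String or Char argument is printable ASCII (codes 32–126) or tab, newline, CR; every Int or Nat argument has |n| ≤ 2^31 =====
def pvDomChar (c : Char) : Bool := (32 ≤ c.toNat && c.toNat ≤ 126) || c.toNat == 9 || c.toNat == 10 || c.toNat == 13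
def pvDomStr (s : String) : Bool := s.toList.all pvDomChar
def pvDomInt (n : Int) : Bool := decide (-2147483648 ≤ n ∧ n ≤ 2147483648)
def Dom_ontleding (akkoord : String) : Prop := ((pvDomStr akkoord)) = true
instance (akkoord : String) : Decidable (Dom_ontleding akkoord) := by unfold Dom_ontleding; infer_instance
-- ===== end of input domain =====

-- B splits the chord by direct indexing (s[0] plus optional '#') and slice-and-replace for the type, instead of A's index-scanning accumulation loop.


-- ===== PORT A =====
-- one iteration of A's for-loop body; state = (grondnoot, type) as char lists
def pvStepA (listTxt : List Char) (st : List Char × List Char) (i : Int) : List Char × List Char :=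
  let g := if i = 0 then [PySem.List.pyGetD listTxt i ' '] else st.1
  let g := if i = 1 ∧ PySem.List.pyGetD listTxt i ' ' = '#' then g ++ [PySem.List.pyGetD listTxt i ' '] else g
  let t := if i ≠ 0 ∧ PySem.List.pyGetD listTxt i ' ' ≠ '#' then st.2 ++ [PySem.List.pyGetD listTxt i ' '] else st.2
  (g, t)

def ontleding (akkoord : String) : String × String :=
  let listTxt := akkoord.toList
  let res := (PySem.List.pyRange 0 (listTxt.length : Int)).foldl (pvStepA listTxt) ([], [])
  (String.ofList res.1, String.ofList res.2)

-- ===== PORT B =====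
def ontleding_alt (akkoord : String) : String × String :=
  let s := akkoord.toList
  if s.isEmpty then ("", "")
  else
    let grondnoot := [PySem.List.pyGetD s 0 ' ']
    let grondnoot := if 1 < s.length ∧ PySem.List.pyGetD s 1 ' ' = '#' then grondnoot ++ ['#'] else grondnoot
    (String.ofList grondnoot,
     String.ofList (PySem.Chars.replace (PySem.List.slice s (some 1) none) ['#'] []))

-- ===== PRECONDITION & SPEC =====
def Spec_ontleding (akkoord : String) (out : String × String) : Prop := out = ontleding_alt akkoord
instance (akkoord : String) (out : String × String) : Decidable (Spec_ontleding akkoord out) := by unfold Spec_ontleding; infer_instance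

-- ===== CLAIM (what is proved, stated in full; the proofs are below) =====
def Claim_equal_ontleding : Prop := ∀ (akkoord : String), Dom_ontleding akkoord → Spec_ontleding akkoord (ontleding akkoord)

-- ===== LEMMAS AND PROOFS =====

-- B's s[1:].replace('#','') keeps exactly the non-'#' characters
theorem pv_go_filter : ∀ (l : List Char) (fuel : Nat) (acc : List Char), l.length ≤ fuel →
    PySem.Chars.replace.go ['#'] [] fuel l acc = acc.reverse ++ l.filter (· ≠ '#') := by
  intro l
  induction l with
  | nil => intro fuel acc h; cases fuel <;> simp [PySem.Chars.replace.go]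
  | cons c t ih =>
    intro fuel acc h
    cases fuel with
    | zero => simp at h
    | succ n =>
      simp only [PySem.Chars.replace.go]
      by_cases hc : c = '#'
      · subst hc
        simp [List.isPrefixOf, ih n acc (by simpa using h)]
      · have hp : List.isPrefixOf ['#'] (c :: t) = false := by
          simp [List.isPrefixOf]; exact fun he => (hc he.symm).elim
        simp [hp, ih n (c :: acc) (by simpa using h), hc]

theorem pv_replace_filter (cs : List Char) :
    PySem.Chars.replace cs ['#'] [] = cs.filter (· ≠ '#') := by
  simp [PySem.Chars.replace, pv_go_filter cs cs.length [] le_rfl]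

-- A's loop from index k ≥ 2 on only appends the non-'#' characters of l.drop k to type
theorem pv_foldA_tail (l : List Char) : ∀ (m k : Nat) (g t : List Char), 2 ≤ k → l.length - k ≤ m →
    (PySem.List.pyRange (k : Int) (l.length : Int)).foldl (pvStepA l) (g, t)
      = (g, t ++ (l.drop k).filter (· ≠ '#')) := by
  intro m
  induction m with
  | zero =>
    intro k g t hk hm
    have hle : l.length ≤ k := by omega
    have : ¬ ((k : Int) < (l.length : Int)) := by exact_mod_cast not_lt.mpr hle
    rw [PySem.List.pyRange_one_eq_nil (by omega)]
    simp [List.drop_eq_nil_of_le hle]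
  | succ n ih =>
    intro k g t hk hm
    by_cases hlt : k < l.length
    · rw [PySem.List.pyRange_one_cons (by exact_mod_cast hlt)]
      have hcast : ((k : Int) + 1) = ((k + 1 : Nat) : Int) := by push_cast; ring
      have hget : PySem.List.pyGetD l (k : Int) ' ' = l[k] := by
        rw [PySem.List.pyGetD_natCast]; exact List.getD_eq_getElem l ' ' hlt
      have hdrop : l.drop k = l[k] :: l.drop (k + 1) := List.drop_eq_getElem_cons hlt
      have hstep : pvStepA l (g, t) (k : Int)
          = (g, if l[k] = '#' then t else t ++ [l[k]]) := by
        simp only [pvStepA, hget]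
        rw [if_neg (show ¬ (k : Int) = 0 by omega),
            if_neg (show ¬ ((k : Int) = 1 ∧ l[k] = '#') from fun h => by
              have := h.1; omega)]
        by_cases hsharp : l[k] = '#'
        · rw [if_neg (fun h => h.2 hsharp), if_pos hsharp]
        · rw [if_pos ⟨by omega, hsharp⟩, if_neg hsharp]
      rw [List.foldl_cons, hstep]
      by_cases hsharp : l[k] = '#'
      · rw [if_pos hsharp, hcast, ih (k + 1) _ _ (by omega) (by omega)]
        rw [hdrop, List.filter_cons]
        simp [hsharp]
      · rw [if_neg hsharp, hcast, ih (k + 1) _ _ (by omega) (by omega)]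
        rw [hdrop, List.filter_cons]
        simp [hsharp]
    · have hle : l.length ≤ k := by omega
      rw [PySem.List.pyRange_one_eq_nil (by omega)]
      simp [List.drop_eq_nil_of_le hle]

-- ===== VERDICT (by name: the statement is the Claim_ definition above) =====
theorem ontleding_spec : Claim_equal_ontleding := by
  intro akkoord _
  unfold Spec_ontleding ontleding ontleding_alt
  cases hl : akkoord.toList with
  | nil => simp
  | cons c rest =>
    simp only [List.isEmpty_cons, Bool.false_eq_true, if_false]
    rw [PySem.List.slice_from_one, pv_replace_filter]
    have hn : (0 : Int) < ((c :: rest).length : Int) := by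
      exact_mod_cast Nat.succ_pos rest.length
    rw [PySem.List.pyRange_one_cons hn]
    have hget0 : PySem.List.pyGetD (c :: rest) (0 : Int) ' ' = c :=
      PySem.List.pyGetD_zero_cons c rest ' '
    have hstep0 : pvStepA (c :: rest) ([], []) 0 = ([c], []) := by
      simp [pvStepA, hget0]
    rw [List.foldl_cons, hstep0]
    cases rest with
    | nil =>
      rw [PySem.List.pyRange_one_eq_nil (by norm_num)]
      simp
    | cons d rest' =>
      have h1lt : (0 : Int) + 1 < ((c :: d :: rest').length : Int) := by
        have : (2 : Int) ≤ ((c :: d :: rest').length : Int) := by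
          simp; omega
        omega
      have hget1 : PySem.List.pyGetD (c :: d :: rest') ((0 : Int) + 1) ' ' = d := by
        have := PySem.List.pyGetD_natCast (c :: d :: rest') 1 ' '
        simpa using this
      have hg1 : PySem.List.pyGetD (c :: d :: rest') (1 : Int) ' ' = d := by
        have := PySem.List.pyGetD_natCast (c :: d :: rest') 1 ' '
        simpa using this
      have hcast2 : ((0 : Int) + 1 + 1) = ((2 : Nat) : Int) := by norm_num
      by_cases hd : d = '#'
      · subst hd
        have hstep1 : pvStepA (c :: '#' :: rest') ([c], []) ((0 : Int) + 1) = ([c, '#'], []) := by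
          simp [pvStepA, hg1]
        rw [PySem.List.pyRange_one_cons h1lt, List.foldl_cons, hstep1, hcast2,
          pv_foldA_tail (c :: '#' :: rest') (c :: '#' :: rest').length 2 _ _ (by omega) (by omega)]
        simp [hg1]
      · have hstep1 : pvStepA (c :: d :: rest') ([c], []) ((0 : Int) + 1) = ([c], [d]) := by
          simp [pvStepA, hg1, hd]
        rw [PySem.List.pyRange_one_cons h1lt, List.foldl_cons, hstep1, hcast2,
          pv_foldA_tail (c :: d :: rest') (c :: d :: rest').length 2 _ _ (by omega) (by omega)]
        simp [hg1, hd]
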